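-- pv_equiv track=rewrite | github.com/donl0/mark-telebot | BotShell/utils/text.py | telegram_markup
-- ===== SOURCE A (Python) =====
-- def telegram_markup(text):
--     delete_markup = ['<p>', '</p>', '<br />', '<br/>', '<ul>', '</ul>', '</li>']
--     text = text.replace('<strong>', '<b>')
--     text = text.replace('</strong>', '</b>')
--     text = text.replace('<em>', '<i>')
--     text = text.replace('</em>', '</i>')
--     text = text.replace('&nbsp;', ' ')
--     text = text.replace('&laquo;', '"')
--     text = text.replace('&raquo;', '"')
--     text = text.replace('&mdash;', '-')
--     text = text.replace('<li>', '- ')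
--
--     for markup in delete_markup:
--         text = text.replace(markup, '')
--
--     return text
-- ===== SOURCE B (Python) =====
-- import re
--
-- # Single left-to-right pass: one substitution table + one compiled alternation,
-- # instead of sixteen full-string replace passes.
-- _TABLE = {
--     '<strong>': '<b>',
--     '</strong>': '</b>',
--     '<em>': '<i>',
--     '</em>': '</i>',
--     '&nbsp;': ' ',
--     '&laquo;': '"',
--     '&raquo;': '"',
--     '&mdash;': '-',
--     '<li>': '- ',
--     '<p>': '',
--     '</p>': '',
--     '<br />': '',
--     '<br/>': '',
--     '<ul>': '',
--     '</ul>': '',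
--     '</li>': '',
-- }
-- _PATTERN = re.compile('|'.join(re.escape(p) for p in _TABLE))
--
--
-- def telegram_markup(text):
--     return _PATTERN.sub(lambda m: _TABLE[m.group(0)], text)
-- ===== Notes on version B (the rewrite author's own statement) =====
-- stated objective: idiomatic
-- what changed: Replaces A's sixteen sequential full-string .replace passes by one substitution dict plus a single compiled regex alternation applied in one left-to-right re.sub pass with a table lookup as the replacement.
-- outside the precondition, e.g. on telegram_markup('<br&nbsp;/>'): A returns '', B returns '<br />'; on telegram_markup('<ul<p>>'): A returns '', B returns '<ul>'
import Mathlib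
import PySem

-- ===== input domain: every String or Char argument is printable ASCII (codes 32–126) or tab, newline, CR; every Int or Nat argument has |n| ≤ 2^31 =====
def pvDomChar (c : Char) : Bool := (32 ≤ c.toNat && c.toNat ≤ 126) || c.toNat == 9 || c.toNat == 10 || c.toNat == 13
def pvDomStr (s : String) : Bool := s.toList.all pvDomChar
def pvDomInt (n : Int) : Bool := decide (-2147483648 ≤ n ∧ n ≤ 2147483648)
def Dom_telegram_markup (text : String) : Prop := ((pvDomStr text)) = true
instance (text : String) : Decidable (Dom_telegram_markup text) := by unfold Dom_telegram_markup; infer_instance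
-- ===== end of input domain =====

-- B replaces A's sixteen sequential full-string replace passes by ONE left-to-right pass over a
-- pattern → replacement table (alternative decomposition, not claimed faster); Pre_ excludes the
-- rare texts on which A's sequential passes cascade.

-- ===== PORT A =====
def telegram_markup (text : String) : String :=
  let text := PySem.Str.replace text "<strong>" "<b>"
  let text := PySem.Str.replace text "</strong>" "</b>"
  let text := PySem.Str.replace text "<em>" "<i>"
  let text := PySem.Str.replace text "</em>" "</i>"
  let text := PySem.Str.replace text "&nbsp;" " "
  let text := PySem.Str.replace text "&laquo;" "\""
  let text := PySem.Str.replace text "&raquo;" "\""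
  let text := PySem.Str.replace text "&mdash;" "-"
  let text := PySem.Str.replace text "<li>" "- "
  let text := (["<p>", "</p>", "<br />", "<br/>", "<ul>", "</ul>", "</li>"]).foldl
    (fun t markup => PySem.Str.replace t markup "") text
  text

-- ===== PORT B =====
-- Source B's substitution table, in its (insertion) order.
def tmTable : List (List Char × List Char) :=
  [ ("<strong>".toList, "<b>".toList), ("</strong>".toList, "</b>".toList),
    ("<em>".toList, "<i>".toList), ("</em>".toList, "</i>".toList),
    ("&nbsp;".toList, " ".toList), ("&laquo;".toList, "\"".toList),
    ("&raquo;".toList, "\"".toList), ("&mdash;".toList, "-".toList),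
    ("<li>".toList, "- ".toList), ("<p>".toList, []), ("</p>".toList, []),
    ("<br />".toList, []), ("<br/>".toList, []), ("<ul>".toList, []),
    ("</ul>".toList, []), ("</li>".toList, []) ]

-- first table pattern matching at the head of s (= the regex alternation's choice at this position)
def tmMatch (s : List Char) : Option (List Char × List Char) :=
  tmTable.find? (fun pr => pr.1.isPrefixOf s)

-- re.sub with a literal alternation and a table lookup as replacement = one left-to-right scan:
-- at each position emit the replacement of the matching pattern (and skip it), else copy the char.
def tmScan : List Char → List Char
  | [] => []
  | c :: t =>
    match tmMatch (c :: t) with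
    | some pr => pr.2 ++ tmScan (t.drop (pr.1.length - 1))
    | none => c :: tmScan t
termination_by s => s.length
decreasing_by
  all_goals simp only [List.length_drop, List.length_cons]; omega

def telegram_markup_alt (text : String) : String := String.ofList (tmScan text.toList)

-- ===== PRECONDITION & SPEC =====
-- the eight strings whose replacement is '' or ' ' (the seven deleted tags and the space entity)
def tmDel : List (List Char) :=
  [ "<p>".toList, "</p>".toList, "<br />".toList, "<br/>".toList,
    "<ul>".toList, "</ul>".toList, "</li>".toList, "&nbsp;".toList ]

-- Pre_ excludes texts containing a proper prefix of one markup pattern immediately followed by a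
-- deleted tag or the non-breaking-space entity (e.g. '<br&nbsp;/>', '<ul<p>>'): there A's sequential passes cascade —
-- one pass's output completes a pattern for a later pass — an artefact of pass order that a single
-- left-to-right pass has no reason to reproduce.
def Pre_telegram_markup (text : String) : Prop :=
  ∀ pr ∈ tmTable, ∀ k, k < pr.1.length → 1 ≤ k → ∀ u ∈ tmDel,
    ¬ (pr.1.take k ++ u) <:+: text.toList
instance (text : String) : Decidable (Pre_telegram_markup text) := by
  unfold Pre_telegram_markup; infer_instance

def pvWitness_telegram_markup : String := "a <strong>b</strong>&nbsp;<li>c</li>"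

def Spec_telegram_markup (text : String) (out : String) : Prop := out = telegram_markup_alt text
instance (text : String) (out : String) : Decidable (Spec_telegram_markup text out) := by
  unfold Spec_telegram_markup; infer_instance

-- ===== CLAIM (what is proved, stated in full; the proofs are below) =====
def Claim_equal_telegram_markup : Prop :=
  ∀ (text : String), Dom_telegram_markup text → Pre_telegram_markup text →
    Spec_telegram_markup text (telegram_markup text)

-- ===== LEMMAS AND PROOFS =====

-- A block of the tokenization: a table entry (pattern, replacement) or a plain character.
-- tmRepl is Python's str.replace (one pass, leftmost, non-overlapping) as plain structural recursion.
def tmRepl (old new : List Char) : List Char → List Char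
  | [] => []
  | c :: t =>
    if old.isPrefixOf (c :: t) ∧ old ≠ [] then new ++ tmRepl old new (t.drop (old.length - 1))
    else c :: tmRepl old new t
termination_by s => s.length
decreasing_by
  all_goals simp only [List.length_drop, List.length_cons]; omega

theorem tmRepl_go (old new : List Char) (h : old ≠ []) :
    ∀ fuel l acc, l.length ≤ fuel →
      PySem.Chars.replace.go old new fuel l acc = acc.reverse ++ tmRepl old new l := by
  intro fuel
  induction fuel with
  | zero =>
    intro l acc hl
    have : l = [] := List.eq_nil_of_length_eq_zero (Nat.le_zero.mp hl)
    subst this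
    simp [PySem.Chars.replace.go, tmRepl]
  | succ n ih =>
    intro l acc hl
    cases l with
    | nil => simp [PySem.Chars.replace.go, tmRepl]
    | cons c t =>
      obtain ⟨o, os, rfl⟩ : ∃ o os, old = o :: os := by
        cases old with
        | nil => exact absurd rfl h
        | cons o os => exact ⟨o, os, rfl⟩
      by_cases hp : (o :: os).isPrefixOf (c :: t) = true
      · rw [PySem.Chars.replace.go]
        simp only [hp, if_true]
        rw [tmRepl]
        have hlen : (List.drop (o :: os).length (c :: t)).length ≤ n := by
          simp only [List.length_drop, List.length_cons] at *
          omega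
        rw [ih _ _ hlen]
        simp [hp, List.drop_succ_cons]
      · rw [PySem.Chars.replace.go]
        simp only [hp]
        rw [ih t (c :: acc) (by simpa using Nat.lt_succ_iff.mp (by simpa using hl))]
        rw [tmRepl]
        simp [hp]

theorem tmRepl_eq_replace (old new s : List Char) :
    PySem.Chars.replace s old new =
      if old.isEmpty then new ++ s.flatMap (fun c => c :: new) else tmRepl old new s := by
  by_cases h : old.isEmpty = true
  · simp [PySem.Chars.replace, h]
  · have hne : old ≠ [] := by simpa [List.isEmpty_iff] using h
    simp only [h, PySem.Chars.replace]
    rw [tmRepl_go old new hne s.length s [] (le_refl _)]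
    simp

-- tokenization of the input: greedy scan, same recursion as tmScan but keeping the blocks
def tmToks : List Char → List ((List Char × List Char) ⊕ Char)
  | [] => []
  | c :: t =>
    match tmMatch (c :: t) with
    | some pr => Sum.inl pr :: tmToks (t.drop (pr.1.length - 1))
    | none => Sum.inr c :: tmToks t
termination_by s => s.length
decreasing_by
  all_goals simp only [List.length_drop, List.length_cons]; omega

-- render a block at a stage: entries in S already replaced, others still literal
def tmRend (S : List (List Char × List Char)) : (List Char × List Char) ⊕ Char → List Char
  | Sum.inl pr => if pr ∈ S then pr.2 else pr.1
  | Sum.inr c => [c]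

def tmFlat (S : List (List Char × List Char))
    (bs : List ((List Char × List Char) ⊕ Char)) : List Char :=
  (bs.map (tmRend S)).flatten

def tmFold (ps : List (List Char × List Char)) (w : List Char) : List Char :=
  ps.foldl (fun w pr => tmRepl pr.1 pr.2 w) w

def tmBlks (bs : List ((List Char × List Char) ⊕ Char)) : Prop :=
  ∀ pr, Sum.inl pr ∈ bs → pr ∈ tmTable

def tmWF (S : List (List Char × List Char))
    (bs : List ((List Char × List Char) ⊕ Char)) : Prop :=
  ∀ n c rest, bs.drop n = Sum.inr c :: rest →
    ∀ pr ∈ tmTable, ¬ pr.1 <+: (c :: tmFlat S rest)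

def tmCleanL (cs : List Char) : Prop :=
  ∀ pr ∈ tmTable, ∀ k, k < pr.1.length → 1 ≤ k → ∀ u ∈ tmDel, ¬ (pr.1.take k ++ u) <:+: cs

-- a position-bounded mismatch between q and w (so q can never be a prefix of w ++ anything)
abbrev tmMis (q w : List Char) : Prop :=
  ∃ i < q.length, i < w.length ∧ q.getD i ' ' ≠ w.getD i ' '

theorem tmMis_not_prefix {q w : List Char} (Z : List Char) (h : tmMis q w) :
    ¬ q <+: (w ++ Z) := by
  rintro hp
  obtain ⟨i, hiq, hiw, hne⟩ := h
  apply hne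
  have h1 := hp.getElem hiq
  have h2 : (w ++ Z)[i]'(by simp; omega) = w[i] := List.getElem_append_left hiw
  simp only [List.getD_eq_getElem?_getD, List.getElem?_eq_getElem hiq,
    List.getElem?_eq_getElem hiw, Option.getD_some]
  rw [h1]; exact h2

theorem tmHead_ne {q v : List Char} (Z : List Char) (hq : q ≠ []) (hv : v ≠ [])
    (h : q.getD 0 ' ' ≠ v.getD 0 ' ') : ¬ q <+: (v ++ Z) := by
  cases q with
  | nil => exact absurd rfl hq
  | cons a q' =>
    cases v with
    | nil => exact absurd rfl hv
    | cons b v' =>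
      intro hp
      rw [List.cons_append] at hp
      exact h (by simpa using (List.cons_prefix_cons.mp hp).1)

theorem tmDropGetD (w : List Char) (k : Nat) (d : Char) :
    (w.drop k).getD 0 d = w.getD k d := by
  simp [List.getD_eq_getElem?_getD, List.getElem?_drop]

-- finite facts about the literal table, all by decide
theorem tmF_ne : ∀ pr ∈ tmTable, pr.1 ≠ [] := by decide
theorem tmF_start : ∀ pr ∈ tmTable, pr.1.getD 0 ' ' = '<' ∨ pr.1.getD 0 ' ' = '&' := by decide
theorem tmF_int : ∀ pr ∈ tmTable, ∀ k, k < pr.1.length → 1 ≤ k →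
    pr.1.getD k ' ' ≠ '<' ∧ pr.1.getD k ' ' ≠ '&' ∧
    pr.1.getD k ' ' ≠ '"' ∧ pr.1.getD k ' ' ≠ '-' := by decide
theorem tmF_mis : ∀ pr ∈ tmTable, ∀ qr ∈ tmTable, pr.1 ≠ qr.1 → tmMis pr.1 qr.1 := by decide
theorem tmF_omis : ∀ pr ∈ tmTable, ∀ qr ∈ tmTable, qr.2 ≠ [] → tmMis pr.1 qr.2 := by decide
theorem tmF_oint : ∀ qr ∈ tmTable, ∀ m, m < qr.2.length → 1 ≤ m →
    qr.2.getD m ' ' ≠ '<' ∧ qr.2.getD m ' ' ≠ '&' := by decide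
theorem tmF_inj : ∀ pr ∈ tmTable, ∀ qr ∈ tmTable, pr.1 = qr.1 → pr = qr := by decide
theorem tmF_del : ∀ pr ∈ tmTable, pr.2 = [] → pr.1 ∈ tmDel := by decide
theorem tmF_sp : ∀ pr ∈ tmTable, pr.2 ≠ [] → pr.2.getD 0 ' ' = ' ' → pr.1 ∈ tmDel := by decide
theorem tmF_ohead : ∀ pr ∈ tmTable, pr.2 ≠ [] →
    pr.2.getD 0 ' ' = '<' ∨ pr.2.getD 0 ' ' = '"' ∨
    pr.2.getD 0 ' ' = '-' ∨ pr.2.getD 0 ' ' = ' ' := by decide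

-- a pattern of the table cannot match anywhere inside w (mismatch at the start, no '<'/'&' inside)
theorem tmNoMatchIn (q : List Char × List Char) (w : List Char) (hq : q ∈ tmTable)
    (hw0 : tmMis q.1 w)
    (hint : ∀ k, k < w.length → 1 ≤ k → w.getD k ' ' ≠ '<' ∧ w.getD k ' ' ≠ '&')
    (Z : List Char) :
    ∀ k, k < w.length → ¬ q.1 <+: (w.drop k ++ Z) := by
  intro k hk
  rcases Nat.eq_zero_or_pos k with rfl | hk1
  · simpa using tmMis_not_prefix Z hw0
  · have hwd : w.drop k ≠ [] := by
      apply List.ne_nil_of_length_pos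
      simp only [List.length_drop]; omega
    apply tmHead_ne Z (tmF_ne _ hq) hwd
    rw [tmDropGetD]
    rcases tmF_start q hq with h | h <;> rw [h]
    · exact ((hint k hk hk1).1).symm
    · exact ((hint k hk hk1).2).symm

theorem tmRepl_skip (old new : List Char) :
    ∀ w Z, (∀ k, k < w.length → ¬ old <+: (w.drop k ++ Z)) →
      tmRepl old new (w ++ Z) = w ++ tmRepl old new Z := by
  intro w
  induction w with
  | nil => intro Z _; simp
  | cons c w' ih =>
    intro Z h
    rw [List.cons_append, tmRepl]
    rw [if_neg (by
      rintro ⟨h1, -⟩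
      exact h 0 (by simp) (by simpa using List.isPrefixOf_iff_prefix.mp h1))]
    rw [ih Z (by intro k hk; simpa using h (k+1) (by simp; omega)), List.cons_append]

theorem tmRepl_head (old new Z : List Char) (hne : old ≠ []) :
    tmRepl old new (old ++ Z) = new ++ tmRepl old new Z := by
  cases old with
  | nil => exact absurd rfl hne
  | cons o os =>
    rw [List.cons_append, tmRepl]
    rw [if_pos ⟨List.isPrefixOf_iff_prefix.mpr (by rw [← List.cons_append]; exact List.prefix_append _ _), by simp⟩]
    simp

theorem tmBlks_tail {b bs} (h : tmBlks (b :: bs)) : tmBlks bs :=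
  fun pr hm => h pr (List.mem_cons_of_mem _ hm)

theorem tmWF_tail {S b bs} (h : tmWF S (b :: bs)) : tmWF S bs :=
  fun n => h (n + 1)

theorem tmFlat_cons (S : List (List Char × List Char)) (b) (bs) :
    tmFlat S (b :: bs) = tmRend S b ++ tmFlat S bs := by
  simp [tmFlat]

-- L1: one replace pass on the stage-i rendering yields the stage-(i+1) rendering
theorem tmStep (i : Nat) (hi : i < tmTable.length) :
    ∀ bs, tmBlks bs → tmWF (tmTable.take i) bs →
      tmRepl (tmTable[i].1) (tmTable[i].2) (tmFlat (tmTable.take i) bs)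
        = tmFlat (tmTable.take (i+1)) bs := by
  intro bs
  induction bs with
  | nil => intro _ _; simp [tmFlat, tmRepl]
  | cons b bs ih =>
    intro hb hwf
    have hbt : tmBlks bs := tmBlks_tail hb
    have hwt : tmWF (tmTable.take i) bs := tmWF_tail hwf
    have hmemTi : tmTable[i] ∈ tmTable := List.getElem_mem hi
    have hTne : tmTable[i].1 ≠ [] := tmF_ne _ hmemTi
    rw [tmFlat_cons, tmFlat_cons]
    cases b with
    | inr c =>
      have hnp : ¬ tmTable[i].1 <+: (c :: tmFlat (tmTable.take i) bs) :=
        hwf 0 c bs rfl _ hmemTi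
      show tmRepl _ _ (c :: tmFlat (tmTable.take i) bs) = c :: tmFlat (tmTable.take (i+1)) bs
      rw [tmRepl]
      rw [if_neg (by rintro ⟨h1, -⟩; exact hnp (List.isPrefixOf_iff_prefix.mp h1))]
      rw [ih hbt hwt]
    | inl pr =>
      have hprT : pr ∈ tmTable := hb pr (List.mem_cons_self)
      by_cases hin : pr ∈ tmTable.take i
      · have hin1 : pr ∈ tmTable.take (i+1) := by
          rw [List.take_succ_eq_append_getElem hi]; exact List.mem_append_left _ hin
        show tmRepl _ _ ((if pr ∈ tmTable.take i then pr.2 else pr.1) ++ _) = _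
        rw [if_pos hin]
        show _ = (if pr ∈ tmTable.take (i+1) then pr.2 else pr.1) ++ _
        rw [if_pos hin1]
        by_cases hout : pr.2 = []
        · rw [hout]; simpa using ih hbt hwt
        · rw [tmRepl_skip _ _ _ _
            (tmNoMatchIn tmTable[i] pr.2 hmemTi (tmF_omis _ hmemTi _ hprT hout)
              (fun k hk h1 => tmF_oint _ hprT k hk h1) _)]
          rw [ih hbt hwt]
      · by_cases heq : pr = tmTable[i]
        · have hin1 : pr ∈ tmTable.take (i+1) := by
            rw [List.take_succ_eq_append_getElem hi]
            exact List.mem_append_right _ (by simp [heq])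
          show tmRepl _ _ ((if pr ∈ tmTable.take i then pr.2 else pr.1) ++ _) = _
          rw [if_neg hin]
          show _ = (if pr ∈ tmTable.take (i+1) then pr.2 else pr.1) ++ _
          rw [if_pos hin1, heq, tmRepl_head _ _ _ hTne, ih hbt hwt]
        · have hin1 : pr ∉ tmTable.take (i+1) := by
            rw [List.take_succ_eq_append_getElem hi]
            simp only [List.mem_append, List.mem_singleton]
            rintro (h | h)
            · exact hin h
            · exact heq h
          show tmRepl _ _ ((if pr ∈ tmTable.take i then pr.2 else pr.1) ++ _) = _
          rw [if_neg hin]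
          show _ = (if pr ∈ tmTable.take (i+1) then pr.2 else pr.1) ++ _
          rw [if_neg hin1]
          have hne1 : tmTable[i].1 ≠ pr.1 := by
            intro h
            exact heq (tmF_inj _ hprT _ hmemTi h.symm)
          rw [tmRepl_skip _ _ _ _
            (tmNoMatchIn tmTable[i] pr.1 hmemTi (tmF_mis _ hmemTi _ hprT hne1)
              (fun k hk h1 => ⟨(tmF_int _ hprT k hk h1).1, (tmF_int _ hprT k hk h1).2.1⟩) _)]
          rw [ih hbt hwt]

theorem tmRend_inr (S : List (List Char × List Char)) (c : Char) :
    tmRend S (Sum.inr c) = [c] := rfl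
theorem tmRend_inl (S : List (List Char × List Char)) (pr : List Char × List Char) :
    tmRend S (Sum.inl pr) = if pr ∈ S then pr.2 else pr.1 := rfl

theorem tmMatch_spec {s : List Char} {pr : List Char × List Char}
    (h : tmMatch s = some pr) : pr ∈ tmTable ∧ pr.1 <+: s := by
  unfold tmMatch at h
  have h2 := List.find?_some (p := fun pr : List Char × List Char => pr.1.isPrefixOf s) h
  exact ⟨List.mem_of_find?_eq_some h, List.isPrefixOf_iff_prefix.mp h2⟩

theorem tmGetD_eq {l : List Char} {k : Nat} (h : k < l.length) : l.getD k ' ' = l[k] := by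
  simp [List.getD_eq_getElem?_getD, List.getElem?_eq_getElem h]

theorem tmFlat0_toks : ∀ cs, tmFlat [] (tmToks cs) = cs := by
  intro cs
  induction cs using tmToks.induct with
  | case1 => simp [tmToks, tmFlat]
  | case2 c t pr hm ih =>
    rw [tmToks, hm, tmFlat_cons, ih]
    obtain ⟨hT, hpre⟩ := tmMatch_spec hm
    have hne := tmF_ne _ hT
    have hdrop : List.drop pr.1.length (c :: t) = t.drop (pr.1.length - 1) := by
      cases hp1 : pr.1 with
      | nil => exact absurd hp1 hne
      | cons p0 p1' => simp
    rw [tmRend_inl, if_neg (List.not_mem_nil), ← hdrop]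
    exact List.prefix_iff_eq_append.mp hpre
  | case3 c t hm ih =>
    rw [tmToks, hm, tmFlat_cons, ih]
    rfl

theorem tmBlks_toks : ∀ cs, tmBlks (tmToks cs) := by
  intro cs
  induction cs using tmToks.induct with
  | case1 => intro pr h; simp [tmToks] at h
  | case2 c t pr hm ih =>
    intro qr h
    rw [tmToks, hm] at h
    rcases List.mem_cons.mp h with h | h
    · cases h; exact (tmMatch_spec hm).1
    · exact ih qr h
  | case3 c t hm ih =>
    intro qr h
    rw [tmToks, hm] at h
    rcases List.mem_cons.mp h with h | h
    · exact absurd h (by simp)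
    · exact ih qr h

-- at a plain-character block the tokenizer found no pattern: the base (stage-[]) well-formedness
theorem tmWF0 : ∀ cs, tmWF [] (tmToks cs) := by
  intro cs
  induction cs using tmToks.induct with
  | case1 => intro n c rest h; rw [tmToks, List.drop_nil] at h; exact absurd h (by simp)
  | case2 c t pr hm ih =>
    intro n c' rest h
    rw [tmToks, hm] at h
    cases n with
    | zero => exact absurd h (by simp)
    | succ m => exact ih m c' rest (by simpa using h)
  | case3 c t hm ih =>
    intro n c' rest h
    rw [tmToks, hm] at h
    cases n with
    | zero =>
      obtain ⟨h1, h2⟩ : Sum.inr c = (Sum.inr c' : (List Char × List Char) ⊕ Char) ∧ tmToks t = rest := by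
        simpa using h
      cases h1; cases h2
      intro qr hqr
      rw [tmFlat0_toks]
      have := List.find?_eq_none.mp hm qr hqr
      intro hp
      exact this (List.isPrefixOf_iff_prefix.mpr hp)
    | succ m => exact ih m c' rest (by simpa using h)

theorem tmFlat_suffix (S : List (List Char × List Char)) (bs) (n : Nat) :
    tmFlat S (bs.drop n) <:+ tmFlat S bs := by
  refine ⟨tmFlat S (bs.take n), ?_⟩
  have h1 : tmFlat S (bs.take n) ++ tmFlat S (bs.drop n) = tmFlat S (bs.take n ++ bs.drop n) := by
    simp only [tmFlat, List.map_take, List.map_drop]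
    rw [← List.flatten_append, List.take_append_drop, List.take_append_drop]
  rw [h1, List.take_append_drop]

-- CASC: a partial pattern match (q with its first k chars already consumed) against a stage-S
-- rendering either matches the un-rendered text too, or exhibits a prefix+deletable in the text
theorem tmCasc (S : List (List Char × List Char)) (q : List Char × List Char)
    (hq : q ∈ tmTable) :
    ∀ bs, tmBlks bs → ∀ k, 1 ≤ k → k ≤ q.1.length →
      q.1.drop k <+: tmFlat S bs →
      q.1.drop k <+: tmFlat [] bs ∨
      ∃ k' u, k ≤ k' ∧ k' < q.1.length ∧ u ∈ tmDel ∧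
        ((q.1.take k').drop k ++ u) <+: tmFlat [] bs := by
  intro bs
  induction bs with
  | nil =>
    intro _ k hk1 hkq hp
    left
    have h0 : q.1.drop k = [] := List.prefix_nil.mp (by simpa [tmFlat] using hp)
    rw [h0]
    exact List.nil_prefix
  | cons b bs ih =>
    intro hb k hk1 hkq hp
    have hbt := tmBlks_tail hb
    by_cases hend : q.1.length ≤ k
    · left
      rw [List.drop_eq_nil_of_le hend]
      exact List.nil_prefix
    rw [not_le] at hend
    have hqk : q.1.drop k = q.1[k] :: q.1.drop (k+1) := List.drop_eq_getElem_cons hend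
    rw [tmFlat_cons] at hp
    cases b with
    | inr c =>
      rw [tmRend_inr, List.singleton_append, hqk] at hp
      have hp' := List.cons_prefix_cons.mp hp
      rcases ih hbt (k+1) (by omega) (by omega) hp'.2 with hL | ⟨k', u, hkk, hk', hu, hR⟩
      · left
        rw [tmFlat_cons, tmRend_inr, List.singleton_append, hqk]
        exact List.cons_prefix_cons.mpr ⟨hp'.1, hL⟩
      · right
        refine ⟨k', u, by omega, hk', hu, ?_⟩
        rw [tmFlat_cons, tmRend_inr, List.singleton_append]
        have hlen : k < (q.1.take k').length := by
          simp only [List.length_take]; omega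
        have htk : (q.1.take k').drop k = q.1[k] :: (q.1.take k').drop (k+1) := by
          rw [List.drop_eq_getElem_cons hlen, List.getElem_take]
        rw [htk, hp'.1, List.cons_append]
        exact List.cons_prefix_cons.mpr ⟨rfl, hR⟩
    | inl pr =>
      have hprT := hb pr List.mem_cons_self
      have hRight : pr.1 ∈ tmDel →
          (∃ k' u, k ≤ k' ∧ k' < q.1.length ∧ u ∈ tmDel ∧
            ((q.1.take k').drop k ++ u) <+: tmFlat [] (Sum.inl pr :: bs)) := by
        intro hdel
        refine ⟨k, pr.1, le_refl _, hend, hdel, ?_⟩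
        rw [tmFlat_cons]
        have h0 : (q.1.take k).drop k = [] := by
          apply List.drop_eq_nil_of_le
          simp [List.length_take]
        rw [h0, List.nil_append, tmRend_inl, if_neg (List.not_mem_nil)]
        exact List.prefix_append _ _
      by_cases hin : pr ∈ S
      · rw [tmRend_inl, if_pos hin] at hp
        by_cases hout : pr.2 = []
        · exact Or.inr (hRight (tmF_del _ hprT hout))
        · -- pr.2 ≠ []: its head is '<', '"', '-' or ' '
          rcases tmF_ohead pr hprT hout with hc | hc | hc | hc
          all_goals (
            first
            | (exact Or.inr (hRight (tmF_sp _ hprT hout hc)))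
            | (exfalso
               rw [hqk] at hp
               cases hp2 : pr.2 with
               | nil => exact hout hp2
               | cons r0 r2' =>
                 rw [hp2, List.cons_append] at hp
                 have hh := (List.cons_prefix_cons.mp hp).1
                 rw [hp2] at hc
                 simp only [List.getD_cons_zero] at hc
                 have hint := tmF_int q hq k hend hk1
                 rw [tmGetD_eq hend, hh, hc] at hint
                 simp at hint))
      · rw [tmRend_inl, if_neg hin] at hp
        exfalso
        rw [hqk] at hp
        cases hp1 : pr.1 with
        | nil => exact tmF_ne _ hprT hp1
        | cons p0 p1' =>
          rw [hp1, List.cons_append] at hp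
          have hh := (List.cons_prefix_cons.mp hp).1
          have hst := tmF_start pr hprT
          rw [hp1] at hst
          simp only [List.getD_cons_zero] at hst
          have hint := tmF_int q hq k hend hk1
          rw [tmGetD_eq hend, hh] at hint
          rcases hst with hst | hst <;> rw [hst] at hint <;> simp at hint

-- L2: under tmCleanL every stage rendering stays well-formed at plain-character blocks
theorem tmWF_stage (cs : List Char) (hcl : tmCleanL cs)
    (S : List (List Char × List Char)) : tmWF S (tmToks cs) := by
  intro n c rest hdrop q hqT hp
  have hWF0 := tmWF0 cs n c rest hdrop q hqT
  have hqne := tmF_ne _ hqT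
  cases hq1 : q.1 with
  | nil => exact hqne hq1
  | cons q0 qt =>
    rw [hq1] at hp
    have hp' := List.cons_prefix_cons.mp hp
    have hdrop1 : q.1.drop 1 = qt := by rw [hq1]; rfl
    have hblks : tmBlks rest := by
      intro pr hm
      apply tmBlks_toks cs pr
      apply List.mem_of_mem_drop (i := n)
      rw [hdrop]
      exact List.mem_cons_of_mem _ hm
    have hlen1 : 1 ≤ q.1.length := by rw [hq1]; simp
    rcases tmCasc S q hqT rest hblks 1 (le_refl _) hlen1 (by rw [hdrop1]; exact hp'.2) with
      hL | ⟨k', u, hk1, hk', hu, hR⟩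
    · apply hWF0
      rw [hq1]
      rw [hdrop1] at hL
      exact List.cons_prefix_cons.mpr ⟨hp'.1, hL⟩
    · obtain ⟨m, rfl⟩ : ∃ m, k' = m + 1 := ⟨k' - 1, by omega⟩
      have htk : q.1.take (m+1) = c :: qt.take m := by
        rw [hq1, List.take_succ_cons, hp'.1]
      rw [htk] at hR
      simp only [List.drop_succ_cons, List.drop_zero] at hR
      have hck : (q.1.take (m+1) ++ u) <+: c :: tmFlat [] rest := by
        rw [htk, List.cons_append]
        exact List.cons_prefix_cons.mpr ⟨rfl, hR⟩
      have hsuf : (c :: tmFlat [] rest) <:+ cs := by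
        have he : tmFlat [] ((tmToks cs).drop n) = c :: tmFlat [] rest := by
          rw [hdrop, tmFlat_cons, tmRend_inr, List.singleton_append]
        have hs := tmFlat_suffix [] (tmToks cs) n
        rw [he, tmFlat0_toks] at hs
        exact hs
      obtain ⟨pre, hpre⟩ := hsuf
      obtain ⟨post, hpost⟩ := hck
      exact hcl q hqT (m+1) hk' (by omega) u hu
        ⟨pre, post, by rw [← hpre, ← hpost]; simp⟩

-- the stage induction: i sequential passes = the stage-i rendering of the tokenization
theorem tmStage (cs : List Char) (hcl : tmCleanL cs) :
    ∀ i, i ≤ tmTable.length →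
      tmFold (tmTable.take i) cs = tmFlat (tmTable.take i) (tmToks cs) := by
  intro i
  induction i with
  | zero =>
    intro _
    simp only [List.take_zero, tmFold, List.foldl_nil]
    rw [tmFlat0_toks]
  | succ m ihm =>
    intro hm1
    have hm : m < tmTable.length := by omega
    have hL : tmFold (tmTable.take (m+1)) cs
        = tmRepl (tmTable[m].1) (tmTable[m].2) (tmFold (tmTable.take m) cs) := by
      unfold tmFold
      rw [List.take_succ_eq_append_getElem hm, List.foldl_append]
      simp
    rw [hL, ihm (by omega)]
    exact tmStep m hm (tmToks cs) (tmBlks_toks cs) (tmWF_stage cs hcl (tmTable.take m))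

-- B's scan is exactly the full (stage-16) rendering of the tokenization
theorem tmScan_eq (cs : List Char) : tmScan cs = tmFlat tmTable (tmToks cs) := by
  induction cs using tmToks.induct with
  | case1 => simp [tmScan, tmToks, tmFlat]
  | case2 c t pr hm ih =>
    rw [tmScan, tmToks]
    simp only [hm]
    rw [tmFlat_cons, tmRend_inl, if_pos (tmMatch_spec hm).1, ih]
  | case3 c t hm ih =>
    rw [tmScan, tmToks]
    simp only [hm]
    rw [tmFlat_cons, tmRend_inr, List.singleton_append, ih]

-- A's port is the 16-pass fold over the table
theorem tmRepl_eq_replace' (old new s : List Char) (h : old.isEmpty = false) :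
    PySem.Chars.replace s old new = tmRepl old new s := by
  rw [tmRepl_eq_replace, h]
  simp

theorem tmAport (text : String) : (telegram_markup text).toList = tmFold tmTable text.toList := by
  unfold telegram_markup tmFold tmTable
  simp only [List.foldl_cons, List.foldl_nil, PySem.Str.toList_replace]
  rw [tmRepl_eq_replace' (old := "<strong>".toList) (new := "<b>".toList) (h := rfl),
      tmRepl_eq_replace' (old := "</strong>".toList) (new := "</b>".toList) (h := rfl),
      tmRepl_eq_replace' (old := "<em>".toList) (new := "<i>".toList) (h := rfl),
      tmRepl_eq_replace' (old := "</em>".toList) (new := "</i>".toList) (h := rfl),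
      tmRepl_eq_replace' (old := "&nbsp;".toList) (new := " ".toList) (h := rfl),
      tmRepl_eq_replace' (old := "&laquo;".toList) (new := "\"".toList) (h := rfl),
      tmRepl_eq_replace' (old := "&raquo;".toList) (new := "\"".toList) (h := rfl),
      tmRepl_eq_replace' (old := "&mdash;".toList) (new := "-".toList) (h := rfl),
      tmRepl_eq_replace' (old := "<li>".toList) (new := "- ".toList) (h := rfl),
      tmRepl_eq_replace' (old := "<p>".toList) (new := "".toList) (h := rfl),
      tmRepl_eq_replace' (old := "</p>".toList) (new := "".toList) (h := rfl),
      tmRepl_eq_replace' (old := "<br />".toList) (new := "".toList) (h := rfl),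
      tmRepl_eq_replace' (old := "<br/>".toList) (new := "".toList) (h := rfl),
      tmRepl_eq_replace' (old := "<ul>".toList) (new := "".toList) (h := rfl),
      tmRepl_eq_replace' (old := "</ul>".toList) (new := "".toList) (h := rfl),
      tmRepl_eq_replace' (old := "</li>".toList) (new := "".toList) (h := rfl)]
  rfl

-- ===== VERDICT (by name: the statement is the Claim_ definition above) =====
theorem telegram_markup_spec : Claim_equal_telegram_markup := by
  intro text _ hpre
  unfold Spec_telegram_markup
  have hcl : tmCleanL text.toList := hpre
  have h1 : (telegram_markup text).toList = (telegram_markup_alt text).toList := by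
    rw [tmAport]
    have h2 := tmStage text.toList hcl tmTable.length (le_refl _)
    rw [List.take_length] at h2
    rw [h2]
    unfold telegram_markup_alt
    rw [String.toList_ofList, tmScan_eq]
  have := congrArg String.ofList h1
  simpa [String.ofList_toList] using this
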